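-- pv_equiv track=rewrite | github.com/AP-MI-2021/lab-4-AlexandruGirlea01 | main.py | procesare_lista
-- ===== SOURCE A (Python) =====
-- def numar_divizori_proprii(x) -> int:
--     """
--     Calculeaza numarul de divizori proprii ai unui numar
--     :param x: Numar real
--     :return: Numarul de divizori proprii ai parametrului x
--     """
--     numar_divizori = 0
--     for i in range(2, x//2):
--         if x % i == 0:
--             numar_divizori += 1
--     return numar_divizori
--
-- def procesare_lista(lista: list) -> list:
--     """
--     Determina lista obtinuta din inlocuirea elementelor ce apar
--     o singura data in lista cu numarul lor de divizori proprii
--     :param lista: Lista asupra careia se face procesarea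
--     :return: Returneaza lista obtinuta in urma efectuarii procesarii
--     """
--     rezultat = []
--     for x in lista:
--         if lista.count(x) == 1:
--             rezultat.append(numar_divizori_proprii(x))
--         else:
--             rezultat.append(x)
--     return rezultat
-- ===== SOURCE B (Python) =====
-- def numar_divizori_proprii(x) -> int:
--     """
--     Numarul de divizori d ai lui x cu 2 <= d < x // 2 (definitia folosita de
--     functia originala), numarati prin imperecherea divizorilor d <-> x // d,
--     deci in O(sqrt(x)) in loc de O(x).
--     """
--     numar_divizori = 0
--     i = 1
--     while i * i <= x:
--         if x % i == 0:
--             if 2 <= i < x // 2: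
--                 numar_divizori += 1
--             j = x // i
--             if j != i and 2 <= j < x // 2:
--                 numar_divizori += 1
--         i += 1
--     return numar_divizori
--
-- def procesare_lista(lista: list) -> list:
--     """
--     Determina lista obtinuta din inlocuirea elementelor ce apar
--     o singura data in lista cu numarul lor de divizori proprii
--     :param lista: Lista asupra careia se face procesarea
--     :return: Returneaza lista obtinuta in urma efectuarii procesarii
--     """
--     aparitii = {}
--     for x in lista:
--         aparitii[x] = aparitii.get(x, 0) + 1
--     return [numar_divizori_proprii(x) if aparitii[x] == 1 else x for x in lista]
-- ===== Notes on version B (the rewrite author's own statement) =====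
-- stated objective: faster
-- what changed: Occurrence counts come from one dict built in a single pass (instead of lista.count scans per element), and the divisor count is computed by sqrt-bounded divisor pairing (i and x//i for i*i <= x) instead of a linear scan up to x//2.
import Mathlib
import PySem

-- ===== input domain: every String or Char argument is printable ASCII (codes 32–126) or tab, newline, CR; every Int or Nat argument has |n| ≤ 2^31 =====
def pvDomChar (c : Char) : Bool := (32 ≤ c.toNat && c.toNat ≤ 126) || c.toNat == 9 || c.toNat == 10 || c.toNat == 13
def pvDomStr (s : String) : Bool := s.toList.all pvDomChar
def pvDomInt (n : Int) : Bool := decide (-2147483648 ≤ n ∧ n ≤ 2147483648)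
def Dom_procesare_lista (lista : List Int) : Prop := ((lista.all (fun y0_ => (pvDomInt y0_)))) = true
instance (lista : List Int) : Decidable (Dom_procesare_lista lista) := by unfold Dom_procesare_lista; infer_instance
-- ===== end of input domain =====

-- B replaces A's per-element `lista.count` scans by one counting dict built in a single
-- pass, and A's linear divisor scan up to x//2 by sqrt-bounded divisor pairing
-- (i and x//i for i*i <= x); same return value on every input.

-- ===== PORT A =====
def numar_divizori_proprii (x : Int) : Int :=
  (PySem.List.pyRange 2 (PySem.Int.floordiv x 2) 1).foldl
    (fun numar_divizori i =>
      if PySem.Int.mod x i == 0 then numar_divizori + 1 else numar_divizori) 0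

def procesare_lista (lista : List Int) : List Int :=
  lista.foldl
    (fun rezultat x =>
      if PySem.List.count lista x == 1 then rezultat ++ [numar_divizori_proprii x]
      else rezultat ++ [x]) []

-- ===== PORT B =====
-- the while loop of Source B's numar_divizori_proprii; the loop counter i (always ≥ 1) is a Nat
-- so that the recursion terminates on the measure x.toNat + 1 - i
def numarDivizoriGo (x : Int) (i : Nat) (numar_divizori : Int) : Int :=
  if h : (i : Int) * i ≤ x then
    let nd1 :=
      if PySem.Int.mod x i == 0 then
        let nd0 :=
          if 2 ≤ (i : Int) ∧ (i : Int) < PySem.Int.floordiv x 2 then numar_divizori + 1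
          else numar_divizori
        let j := PySem.Int.floordiv x i
        if j ≠ (i : Int) ∧ 2 ≤ j ∧ j < PySem.Int.floordiv x 2 then nd0 + 1 else nd0
      else numar_divizori
    numarDivizoriGo x (i + 1) nd1
  else numar_divizori
termination_by x.toNat + 1 - i
decreasing_by
  have hi : (i : Int) ≤ x ∨ i = 0 := by
    rcases Nat.eq_zero_or_pos i with h0 | h0
    · exact Or.inr h0
    · left
      have : (i : Int) * 1 ≤ (i : Int) * i := by
        apply mul_le_mul_of_nonneg_left _ (by positivity)
        exact_mod_cast h0
      omega
  omega

def numar_divizori_proprii_alt (x : Int) : Int := numarDivizoriGo x 1 0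

def procesare_lista_alt (lista : List Int) : List Int :=
  let aparitii : PySem.Dict Int Int :=
    lista.foldl (fun d x => d.insert x (d.getD x 0 + 1)) PySem.Dict.empty
  -- aparitii[x]: the key x is always present (it was counted from the same list), so
  -- the lookup is ported exactly by getD _ 0
  lista.map (fun x => if aparitii.getD x 0 == 1 then numar_divizori_proprii_alt x else x)

-- ===== PRECONDITION & SPEC =====
def Spec_procesare_lista (lista : List Int) (out : List Int) : Prop := out = procesare_lista_alt lista
instance (lista : List Int) (out : List Int) : Decidable (Spec_procesare_lista lista out) := by unfold Spec_procesare_lista; infer_instance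

-- ===== CLAIM (what is proved, stated in full; the proofs are below) =====
def Claim_equal_procesare_lista : Prop := ∀ (lista : List Int), Dom_procesare_lista lista → Spec_procesare_lista lista (procesare_lista lista)

-- ===== LEMMAS AND PROOFS =====

-- the per-index contribution of Source B's pairing loop, over Nat
def pvG (n i : Nat) : Nat :=
  if n % i = 0 then
    (if 2 ≤ i ∧ i < n / 2 then 1 else 0) +
    (if n / i ≠ i ∧ 2 ≤ n / i ∧ n / i < n / 2 then 1 else 0)
  else 0

-- the common value both counts are reduced to
def pvCard (n : Nat) : Nat := ((Finset.Ico 2 (n / 2)).filter (· ∣ n)).card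

lemma pvCountP_range_eq (N : Nat) (p : Nat → Bool) :
    (List.range N).countP p = ((Finset.range N).filter (fun k => p k = true)).card := by
  induction N with
  | zero => simp
  | succ n ih =>
      rw [List.range_succ, List.countP_append, Finset.range_add_one, Finset.filter_insert]
      by_cases h : p n = true
      · rw [if_pos h, Finset.card_insert_of_notMem (by simp), ih]
        simp [h]
      · rw [if_neg h, ih]
        simp [h]

lemma pvACount (n : Nat) : numar_divizori_proprii (n : Int) = (pvCard n : Int) := by
  unfold numar_divizori_proprii
  have h2 : PySem.Int.floordiv (n : Int) 2 = ((n / 2 : Nat) : Int) := by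
    exact_mod_cast PySem.Int.floordiv_natCast n 2
  rw [h2, PySem.List.pyRange_one, List.foldl_map, PySem.List.foldl_if_add_one, zero_add]
  have hM : ((((n / 2 : Nat) : Int)) - 2).toNat = n / 2 - 2 := by omega
  rw [hM]
  have hp : (List.range (n / 2 - 2)).countP (fun (k : Nat) => PySem.Int.mod (n : Int) (2 + (k : Int)) == 0)
      = (List.range (n / 2 - 2)).countP (fun k => decide ((2 + k) ∣ n)) := by
    apply List.countP_congr
    intro k _
    have hcast : (2 + (k : Int)) = ((2 + k : Nat) : Int) := by push_cast; ring
    rw [hcast, PySem.Int.mod_natCast]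
    simp only [beq_iff_eq, Nat.cast_eq_zero, decide_eq_true_eq]
    exact Nat.dvd_iff_mod_eq_zero.symm
  rw [hp, pvCountP_range_eq]
  unfold pvCard
  congr 1
  apply Finset.card_nbij' (fun k => 2 + k) (fun d => d - 2)
  · intro k hk
    simp only [Finset.coe_filter, Finset.mem_range, Set.mem_setOf_eq,
      Finset.mem_Ico, decide_eq_true_eq] at hk ⊢
    exact ⟨⟨by omega, by omega⟩, hk.2⟩
  · intro d hd
    simp only [Finset.coe_filter, Finset.mem_Ico, Finset.mem_range,
      Set.mem_setOf_eq, decide_eq_true_eq] at hd ⊢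
    refine ⟨by omega, ?_⟩
    have : 2 + (d - 2) = d := by omega
    rw [this]; exact hd.2
  · intro k _; simp
  · intro d hd
    simp only [Finset.coe_filter, Finset.mem_Ico, Set.mem_setOf_eq] at hd
    show 2 + (d - 2) = d
    omega

lemma pvGo_eq (n : Nat) :
    ∀ (m i : Nat) (nd : Int), 1 ≤ i → n.sqrt + 1 = i + m →
      numarDivizoriGo (n : Int) i nd = nd + ((∑ k ∈ Finset.Ico i (n.sqrt + 1), pvG n k : Nat) : Int) := by
  intro m
  induction m with
  | zero =>
      intro i nd _ hi
      have hieq : i = n.sqrt + 1 := by omega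
      subst hieq
      rw [numarDivizoriGo, dif_neg ?hneg]
      case hneg =>
        rw [not_le]
        exact_mod_cast Nat.lt_succ_sqrt n
      simp
  | succ m ih =>
      intro i nd h1 hi
      have hile : i ≤ n.sqrt := by omega
      have hcond : ((i : Nat) : Int) * i ≤ (n : Int) := by
        have h' : i * i ≤ n := le_trans (Nat.mul_le_mul hile hile) (by
          have := Nat.sqrt_le' n
          simpa [pow_two] using this)
        exact_mod_cast h'
      rw [numarDivizoriGo, dif_pos hcond]
      show numarDivizoriGo (n : Int) (i + 1)
        (if PySem.Int.mod (n : Int) i == 0 then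
          if PySem.Int.floordiv (n : Int) i ≠ (i : Int) ∧ 2 ≤ PySem.Int.floordiv (n : Int) i ∧
              PySem.Int.floordiv (n : Int) i < PySem.Int.floordiv (n : Int) 2 then
            (if 2 ≤ (i : Int) ∧ (i : Int) < PySem.Int.floordiv (n : Int) 2 then nd + 1 else nd) + 1
          else (if 2 ≤ (i : Int) ∧ (i : Int) < PySem.Int.floordiv (n : Int) 2 then nd + 1 else nd)
        else nd) = _
      rw [ih (i + 1) _ (by omega) (by omega)]
      rw [Finset.sum_eq_sum_Ico_succ_bot (by omega : i < n.sqrt + 1)]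
      have h2 : PySem.Int.floordiv (n : Int) 2 = ((n / 2 : Nat) : Int) := by
        exact_mod_cast PySem.Int.floordiv_natCast n 2
      have hstep : (if PySem.Int.mod (n : Int) i == 0 then
          if PySem.Int.floordiv (n : Int) i ≠ (i : Int) ∧ 2 ≤ PySem.Int.floordiv (n : Int) i ∧
              PySem.Int.floordiv (n : Int) i < PySem.Int.floordiv (n : Int) 2 then
            (if 2 ≤ (i : Int) ∧ (i : Int) < PySem.Int.floordiv (n : Int) 2 then nd + 1 else nd) + 1
          else (if 2 ≤ (i : Int) ∧ (i : Int) < PySem.Int.floordiv (n : Int) 2 then nd + 1 else nd)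
        else nd) = nd + (pvG n i : Int) := by
        rw [h2, PySem.Int.mod_natCast, PySem.Int.floordiv_natCast]
        unfold pvG
        by_cases hm : n % i = 0
        · simp only [hm, Nat.cast_zero, beq_self_eq_true, if_pos]
          by_cases hj : n / i ≠ i ∧ 2 ≤ n / i ∧ n / i < n / 2 <;>
            by_cases hi2 : 2 ≤ i ∧ i < n / 2
          · rw [if_pos (by exact_mod_cast hj), if_pos (by exact_mod_cast hi2),
              if_pos hj, if_pos hi2]
            push_cast; ring
          · rw [if_pos (by exact_mod_cast hj), if_neg (by exact_mod_cast hi2),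
              if_pos hj, if_neg hi2]
            push_cast; ring
          · rw [if_neg (by exact_mod_cast hj), if_pos (by exact_mod_cast hi2),
              if_neg hj, if_pos hi2]
            push_cast; ring
          · rw [if_neg (by exact_mod_cast hj), if_neg (by exact_mod_cast hi2),
              if_neg hj, if_neg hi2]
            push_cast; ring
        · rw [if_neg ?hne, if_neg hm]
          · simp
          case hne => simp only [beq_iff_eq, Nat.cast_eq_zero]; exact hm
      rw [hstep]
      push_cast
      ring

lemma pvSqrt_pos_of (n : Nat) (h : 2 ≤ n) : 1 ≤ n.sqrt := Nat.sqrt_pos.mpr (by omega)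

lemma pvLarge_of_small (n k : Nat) (hd : k ∣ n) (_hk1 : 1 ≤ k) (hks : k ≤ n.sqrt)
    (hne : n / k ≠ k) (h2 : 2 ≤ n / k) : n.sqrt < n / k := by
  have hn2 : 2 ≤ n := le_trans h2 (Nat.div_le_self n k)
  have hs1 : 1 ≤ n.sqrt := pvSqrt_pos_of n hn2
  have hmul : k * (n / k) = n := Nat.mul_div_cancel' hd
  by_contra hle
  rw [not_lt] at hle
  have hssn : n.sqrt * n.sqrt ≤ n := by
    have := Nat.sqrt_le' n
    simpa [pow_two] using this
  rcases lt_or_eq_of_le hks with hlt | heq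
  · have : n < n.sqrt * n.sqrt := by
      calc n = k * (n / k) := hmul.symm
        _ ≤ k * n.sqrt := Nat.mul_le_mul_left k hle
        _ < n.sqrt * n.sqrt := (Nat.mul_lt_mul_right (by omega)).mpr hlt
    omega
  · have hlt2 : n / k < k := by omega
    have : n < n.sqrt * n.sqrt := by
      calc n = k * (n / k) := hmul.symm
        _ < k * k := (Nat.mul_lt_mul_left (by omega)).mpr hlt2
        _ = n.sqrt * n.sqrt := by rw [heq]
    omega

lemma pvSmall_of_large (n d : Nat) (hd : d ∣ n) (_hn : 1 ≤ n) (hds : n.sqrt < d) :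
    n / d ≤ n.sqrt := by
  by_contra hle
  rw [not_le] at hle
  have hmul : d * (n / d) = n := Nat.mul_div_cancel' hd
  have : (n.sqrt + 1) * (n.sqrt + 1) ≤ n := by
    calc (n.sqrt + 1) * (n.sqrt + 1) ≤ d * (n / d) := Nat.mul_le_mul hds hle
      _ = n := hmul
  have h2 := Nat.lt_succ_sqrt n
  simp only [Nat.succ_eq_add_one] at h2
  omega

lemma pvPairing (n : Nat) :
    (∑ k ∈ Finset.Ico 1 (n.sqrt + 1), pvG n k) = pvCard n := by
  have hgt : ∀ k ∈ Finset.Ico 1 (n.sqrt + 1), pvG n k =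
      (if k ∣ n ∧ 2 ≤ k ∧ k < n / 2 then 1 else 0) +
      (if k ∣ n ∧ n / k ≠ k ∧ 2 ≤ n / k ∧ n / k < n / 2 then 1 else 0) := by
    intro k hk
    simp only [Finset.mem_Ico] at hk
    unfold pvG
    by_cases hm : n % k = 0
    · have hd : k ∣ n := Nat.dvd_iff_mod_eq_zero.mpr hm
      simp [hm, hd]
    · have hd : ¬ k ∣ n := fun h => hm (Nat.dvd_iff_mod_eq_zero.mp h)
      simp [hm, hd]
  rw [Finset.sum_congr rfl hgt, Finset.sum_add_distrib, ← Finset.card_filter, ← Finset.card_filter]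
  unfold pvCard
  rw [show (Finset.Ico 2 (n / 2)).filter (· ∣ n) =
      ((Finset.Ico 2 (n / 2)).filter (· ∣ n)).filter (fun d => d ≤ n.sqrt) ∪
      ((Finset.Ico 2 (n / 2)).filter (· ∣ n)).filter (fun d => ¬ d ≤ n.sqrt) from
    (Finset.filter_union_filter_not_eq _ _).symm]
  rw [Finset.card_union_of_disjoint (Finset.disjoint_filter_filter_not _ _ _)]
  congr 1
  · congr 1
    ext d
    simp only [Finset.mem_filter, Finset.mem_Ico]
    constructor
    · rintro ⟨⟨h1, h2⟩, hd, h3, h4⟩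
      exact ⟨⟨⟨h3, h4⟩, hd⟩, by omega⟩
    · rintro ⟨⟨⟨h1, h2⟩, hd⟩, h3⟩
      exact ⟨⟨by omega, by omega⟩, hd, h1, h2⟩
  · apply Finset.card_nbij' (fun k => n / k) (fun d => n / d)
    · intro k hk
      simp only [Finset.coe_filter, Finset.mem_Ico, Set.mem_setOf_eq, Finset.mem_filter] at hk ⊢
      obtain ⟨⟨hk1, hk2⟩, hd, hne, h2, h3⟩ := hk
      refine ⟨⟨⟨h2, h3⟩, Nat.div_dvd_of_dvd hd⟩, ?_⟩
      rw [not_le]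
      exact pvLarge_of_small n k hd hk1 (by omega) hne h2
    · intro d hd
      simp only [Finset.coe_filter, Finset.mem_Ico, Set.mem_setOf_eq, Finset.mem_filter,
        not_le] at hd ⊢
      obtain ⟨⟨⟨h2, h3⟩, hdvd⟩, hs⟩ := hd
      have hn : 1 ≤ n := by omega
      have hdd : n / (n / d) = d := Nat.div_div_self hdvd (by omega)
      have hsm : n / d ≤ n.sqrt := pvSmall_of_large n d hdvd hn hs
      have hd1 : 1 ≤ n / d := (Nat.one_le_div_iff (by omega)).mpr (Nat.le_of_dvd (by omega) hdvd)
      refine ⟨⟨by omega, by omega⟩, Nat.div_dvd_of_dvd hdvd, ?_, ?_, ?_⟩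
      · rw [hdd]; omega
      · rw [hdd]; omega
      · rw [hdd]; omega
    · intro k hk
      simp only [Finset.coe_filter, Finset.mem_Ico, Set.mem_setOf_eq] at hk
      obtain ⟨⟨hk1, hk2⟩, hd, hne, h2, h3⟩ := hk
      show n / (n / k) = k
      exact Nat.div_div_self hd (by
        have : 2 ≤ n := le_trans h2 (Nat.div_le_self n k)
        omega)
    · intro d hd
      simp only [Finset.coe_filter, Finset.mem_Ico, Set.mem_setOf_eq, Finset.mem_filter,
        not_le] at hd
      obtain ⟨⟨⟨h2, h3⟩, hdvd⟩, hs⟩ := hd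
      show n / (n / d) = d
      exact Nat.div_div_self hdvd (by omega)

lemma pvDiv_eq (x : Int) : numar_divizori_proprii x = numar_divizori_proprii_alt x := by
  by_cases hx : x ≤ 0
  · unfold numar_divizori_proprii numar_divizori_proprii_alt
    rw [numarDivizoriGo, dif_neg (by push_cast; omega)]
    have h2 : PySem.Int.floordiv x 2 ≤ 2 := by
      rw [PySem.Int.floordiv_eq_ediv_of_pos (by norm_num)]; omega
    rw [PySem.List.pyRange_one_eq_nil h2]
    rfl
  · obtain ⟨n, rfl⟩ : ∃ n : Nat, x = (n : Int) := ⟨x.toNat, by omega⟩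
    rw [pvACount n]
    unfold numar_divizori_proprii_alt
    rw [pvGo_eq n n.sqrt 1 0 le_rfl (by omega), pvPairing n]
    simp

-- ===== VERDICT (by name: the statement is the Claim_ definition above) =====
theorem procesare_lista_spec : Claim_equal_procesare_lista := by
  intro lista _
  unfold Spec_procesare_lista procesare_lista
  have hfun :
      (fun (rezultat : List Int) x =>
        if PySem.List.count lista x == 1 then rezultat ++ [numar_divizori_proprii x]
        else rezultat ++ [x]) =
      (fun rezultat x =>
        rezultat ++ [if PySem.List.count lista x == 1 then numar_divizori_proprii x else x]) := by
    funext rez x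
    by_cases h : (PySem.List.count lista x == 1) = true
    · rw [if_pos h, if_pos h]
    · rw [if_neg h, if_neg h]
  rw [hfun, PySem.List.foldl_append_singleton_eq_map, List.nil_append]
  show _ = lista.map (fun x =>
    if (lista.foldl (fun d x => d.insert x (d.getD x 0 + 1))
        (PySem.Dict.empty : PySem.Dict Int Int)).getD x 0 == 1
    then numar_divizori_proprii_alt x else x)
  apply List.map_congr_left
  intro x _
  have hc : (lista.foldl (fun d x => d.insert x (d.getD x 0 + 1))
      (PySem.Dict.empty : PySem.Dict Int Int)).getD x 0 = (List.count x lista : Int) := by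
    rw [PySem.Dict.getD_foldl_insert_add_one]; simp
  rw [hc, PySem.List.count_eq]
  have hcond : (((List.count x lista : Int)) == 1) = (List.count x lista == 1) := by
    by_cases h : List.count x lista = 1
    · simp [h]
    · have h' : (List.count x lista : Int) ≠ 1 := by omega
      simp [h, h']
  rw [hcond]
  by_cases h : List.count x lista == 1 <;> simp [h, pvDiv_eq]
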